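-- pv_equiv track=rewrite | github.com/KonstantinS343/aois | lab2/logic.py | translate_in_decimal
-- ===== SOURCE A (Python) =====
-- def translate_in_decimal(object, object_in_bynary):
--     power_for_binary_number = 2
--     index_of_decimal_digit = 0
--     for i in object_in_bynary:
--         if i == '*' or i == '+':
--             power_for_binary_number = 2
--             object.append(0)
--             index_of_decimal_digit+=1
--             continue
--         object[index_of_decimal_digit]+=int(i)*(2**power_for_binary_number)
--         power_for_binary_number-=1
--     return object
-- ===== SOURCE B (Python) =====
-- def translate_in_decimal(object, object_in_bynary):
--     # Tokenize: split the string into groups on '*'/'+', then evaluate each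
--     # group once and add the values positionally (mutates `object` like A does).
--     groups = []
--     current = []
--     for c in object_in_bynary:
--         if c == '*' or c == '+':
--             groups.append(current)
--             current = []
--         else:
--             current.append(c)
--     groups.append(current)
--     values = [sum(int(c) * 2 ** (2 - j) for j, c in enumerate(g)) for g in groups]
--     object.extend([0] * (len(groups) - 1))
--     for k, v in enumerate(values):
--         object[k] += v
--     return object
-- ===== Notes on version B (the rewrite author's own statement) =====
-- stated objective: alternative
-- what changed: Replaces A's single stateful character loop (power/index registers mutated per char) by a tokenize-then-evaluate decomposition: split the string into groups on '*'/'+', evaluate each group once with positional weights 2**(2-j), extend the list and add the group values positionally.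
-- outside the precondition, e.g. on translate_in_decimal([], '+'): A returns [0], B raises IndexError; on translate_in_decimal([], ''): A returns [], B raises IndexError; on translate_in_decimal([1], '1111'): A returns [8.5], B returns [8.5]
import Mathlib
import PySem

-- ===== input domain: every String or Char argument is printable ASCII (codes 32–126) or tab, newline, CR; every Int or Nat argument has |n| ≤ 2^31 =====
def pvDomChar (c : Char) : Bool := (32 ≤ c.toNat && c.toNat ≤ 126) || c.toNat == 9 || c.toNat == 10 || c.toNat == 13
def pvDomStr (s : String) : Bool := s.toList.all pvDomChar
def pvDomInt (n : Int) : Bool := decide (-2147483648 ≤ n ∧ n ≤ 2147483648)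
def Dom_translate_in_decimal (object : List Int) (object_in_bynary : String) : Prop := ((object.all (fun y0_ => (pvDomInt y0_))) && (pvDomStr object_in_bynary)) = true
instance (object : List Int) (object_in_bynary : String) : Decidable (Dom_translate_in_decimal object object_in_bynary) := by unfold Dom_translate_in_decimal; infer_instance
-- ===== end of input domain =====

-- B replaces A's single stateful character loop (power/index registers) by a
-- tokenize-then-evaluate decomposition: split on separators, evaluate each group,
-- add the values positionally (objective: simpler/alternative, same cost).
-- Both A and B mutate `object` in Python (append/extend + item assignment) in the
-- same way on Pre_; the equivalence proved here is about the return value.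

-- shared arithmetic helpers (exact for nonnegative exponents; on Pre_ all exponents used are ≥ 0)
def pvPow2 (p : Int) : Int := if 0 ≤ p then 2 ^ p.toNat else 0
def pvIsSep (c : Char) : Bool := c = '*' || c = '+'
def pvDigit (c : Char) : Int := (c.toNat : Int) - 48   -- int(c) for a decimal digit c

-- ===== PORT A =====
-- A's loop state: (object, power_for_binary_number, index_of_decimal_digit)
def pvStepA (st : List Int × Int × Nat) (c : Char) : List Int × Int × Nat :=
  if pvIsSep c then (st.1 ++ [0], 2, st.2.2 + 1)
  else (st.1.set st.2.2 (st.1.getD st.2.2 0 + pvDigit c * pvPow2 st.2.1), st.2.1 - 1, st.2.2)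

def translate_in_decimal (object : List Int) (object_in_bynary : String) : List Int :=
  (object_in_bynary.toList.foldl pvStepA (object, 2, 0)).1

-- ===== PORT B =====
-- Source B's first loop: accumulate (groups, current) over the characters, then append current
def pvTokStep (st : List (List Char) × List Char) (c : Char) : List (List Char) × List Char :=
  if pvIsSep c then (st.1 ++ [st.2], []) else (st.1, st.2 ++ [c])

-- sum(int(c) * 2 ** (2 - j) for j, c in enumerate(g))
def pvGroupVal (g : List Char) : Int :=
  (PySem.List.enumerate g).foldl (fun acc p => acc + pvDigit p.2 * pvPow2 (2 - p.1)) 0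

def translate_in_decimal_alt (object : List Int) (object_in_bynary : String) : List Int :=
  let st := object_in_bynary.toList.foldl pvTokStep ([], [])
  let groups := st.1 ++ [st.2]
  let values := groups.map pvGroupVal
  let ext := object ++ List.replicate (groups.length - 1) 0
  (PySem.List.enumerate values).foldl (fun o p => o.set p.1.toNat (o.getD p.1.toNat 0 + p.2)) ext

-- ===== PRECONDITION & SPEC =====
-- Pre_ excludes exactly where Python A does not return an int list: a non-digit,
-- non-separator character (ValueError), an empty `object` (IndexError on the first
-- digit; when the string is all separators A does return, but B raises there), and
-- runs of more than 3 digits between separators (A returns a float there).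
def pvDigitChar (c : Char) : Bool := decide ('0' ≤ c) && decide (c ≤ '9')
def Pre_translate_in_decimal (object : List Int) (object_in_bynary : String) : Prop :=
  object ≠ [] ∧
  object_in_bynary.toList.all (fun c => pvIsSep c || pvDigitChar c) = true ∧
  (List.range object_in_bynary.toList.length).all (fun i =>
    !(decide (i + 4 ≤ object_in_bynary.toList.length)) ||
    (List.range (i + 4)).any (fun j =>
      decide (i ≤ j) && pvIsSep (object_in_bynary.toList.getD j ' '))) = true
instance (object : List Int) (object_in_bynary : String) : Decidable (Pre_translate_in_decimal object object_in_bynary) := by unfold Pre_translate_in_decimal; infer_instance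

def pvWitness_translate_in_decimal : List Int × String := ([5], "101+11*9")

def Spec_translate_in_decimal (object : List Int) (object_in_bynary : String) (out : List Int) : Prop := out = translate_in_decimal_alt object object_in_bynary
instance (object : List Int) (object_in_bynary : String) (out : List Int) : Decidable (Spec_translate_in_decimal object object_in_bynary out) := by unfold Spec_translate_in_decimal; infer_instance

-- ===== CLAIM (what is proved, stated in full; the proofs are below) =====
def Claim_equal_translate_in_decimal : Prop := ∀ (object : List Int) (object_in_bynary : String), Dom_translate_in_decimal object object_in_bynary → Pre_translate_in_decimal object object_in_bynary → Spec_translate_in_decimal object object_in_bynary (translate_in_decimal object object_in_bynary)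

-- ===== LEMMAS AND PROOFS =====

-- value of a digit run read with exponents p, p-1, …
def pvValp (p : Int) : List Char → Int
  | [] => 0
  | c :: cs => pvDigit c * pvPow2 p + pvValp (p - 1) cs

-- natural recursion form of Source B's tokenizer, with accumulator
def pvTkr (cur : List Char) : List Char → List (List Char)
  | [] => [cur]
  | c :: cs => if pvIsSep c then cur :: pvTkr [] cs else pvTkr (cur ++ [c]) cs

-- positional add, natural-index form
def pvAddVals (o : List Int) (k : Nat) : List Int → List Int
  | [] => o
  | v :: vs => pvAddVals (o.set k (o.getD k 0 + v)) (k + 1) vs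

lemma pvTok_eq (l : List Char) : ∀ gs cur,
    (l.foldl pvTokStep (gs, cur)).1 ++ [(l.foldl pvTokStep (gs, cur)).2] = gs ++ pvTkr cur l := by
  induction l with
  | nil => simp [pvTkr]
  | cons c cs ih =>
      intro gs cur
      by_cases h : pvIsSep c = true
      · simp [pvTokStep, pvTkr, h, ih]
      · simp [pvTokStep, pvTkr, h, ih]

lemma pvGroupVal_aux (g : List Char) : ∀ (k : Nat) (acc : Int),
    (PySem.List.enumerate g (k : Int)).foldl (fun acc p => acc + pvDigit p.2 * pvPow2 (2 - p.1)) acc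
      = acc + pvValp (2 - (k : Int)) g := by
  induction g with
  | nil => simp [PySem.List.enumerate_nil, pvValp]
  | cons c cs ih =>
      intro k acc
      rw [PySem.List.enumerate_cons]
      have : ((k : Int) + 1) = ((k + 1 : Nat) : Int) := by push_cast; ring
      simp only [List.foldl_cons, this, ih]
      simp [pvValp]
      ring_nf

lemma pvGroupVal_eq (g : List Char) : pvGroupVal g = pvValp 2 g := by
  have := pvGroupVal_aux g 0 0
  simpa [pvGroupVal, PySem.List.enumerate] using this

lemma pvEnumFold_eq (vs : List Int) : ∀ (k : Nat) (o : List Int),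
    (PySem.List.enumerate vs (k : Int)).foldl (fun o p => o.set p.1.toNat (o.getD p.1.toNat 0 + p.2)) o
      = pvAddVals o k vs := by
  induction vs with
  | nil => simp [PySem.List.enumerate_nil, pvAddVals]
  | cons v vs ih =>
      intro k o
      rw [PySem.List.enumerate_cons]
      have : ((k : Int) + 1) = ((k + 1 : Nat) : Int) := by push_cast; ring
      simp only [List.foldl_cons, this, ih, pvAddVals, Int.toNat_natCast]

-- A's loop over a run of non-separator characters
lemma pvFoldDigits (ds : List Char) : ∀ (p : Int) (obj : List Int) (idx : Nat),
    (∀ c ∈ ds, pvIsSep c = false) → idx < obj.length →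
    ds.foldl pvStepA (obj, p, idx)
      = (obj.set idx (obj.getD idx 0 + pvValp p ds), p - ds.length, idx) := by
  induction ds with
  | nil =>
      intro p obj idx _ hidx
      simp [pvValp, List.getD, hidx]
  | cons d ds ih =>
      intro p obj idx hval hidx
      have hd : pvIsSep d = false := hval d (by simp)
      have hrec := ih (p - 1) (obj.set idx (obj.getD idx 0 + pvDigit d * pvPow2 p)) idx
        (fun c hc => hval c (by simp [hc])) (by simpa using hidx)
      have hget : (obj.set idx (obj.getD idx 0 + pvDigit d * pvPow2 p)).getD idx 0
          = obj.getD idx 0 + pvDigit d * pvPow2 p := by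
        simp [List.getD, hidx]
      simp only [List.foldl_cons, pvStepA, hd, Bool.false_eq_true, if_false, hrec, hget,
        List.set_set, pvValp, List.length_cons]
      have h1 : obj.getD idx 0 + pvDigit d * pvPow2 p + pvValp (p - 1) ds
          = obj.getD idx 0 + (pvDigit d * pvPow2 p + pvValp (p - 1) ds) := by ring
      have h2 : p - 1 - (ds.length : Int) = p - ((ds.length : Nat) + 1 : Nat) := by push_cast; ring
      rw [h1, h2]

-- the tokenizer never returns an empty list of groups
lemma pvTkr_length_pos (l : List Char) : ∀ cur, 0 < (pvTkr cur l).length := by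
  induction l with
  | nil => intro cur; simp [pvTkr]
  | cons c cs ih =>
      intro cur
      by_cases h : pvIsSep c = true
      · simp [pvTkr, h]
      · simp only [pvTkr, h, Bool.false_eq_true, if_false]
        exact ih _

lemma pvTkr_nosep (l : List Char) : ∀ cur, (∀ c ∈ l, pvIsSep c = false) → pvTkr cur l = [cur ++ l] := by
  induction l with
  | nil => intro cur _; simp [pvTkr]
  | cons c cs ih =>
      intro cur h
      have hc : pvIsSep c = false := h c (by simp)
      simp only [pvTkr, hc, Bool.false_eq_true, if_false]
      rw [ih _ (fun x hx => h x (by simp [hx]))]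
      simp

lemma pvTkr_split (s : Char) (rest : List Char) (hs : pvIsSep s = true) :
    ∀ (ds cur : List Char), (∀ c ∈ ds, pvIsSep c = false) →
    pvTkr cur (ds ++ s :: rest) = (cur ++ ds) :: pvTkr [] rest := by
  intro ds
  induction ds with
  | nil => intro cur _; simp [pvTkr, hs]
  | cons d ds ih =>
      intro cur h
      have hd : pvIsSep d = false := h d (by simp)
      simp only [List.cons_append, pvTkr, hd, Bool.false_eq_true, if_false]
      rw [ih _ (fun x hx => h x (by simp [hx]))]
      simp

-- head of a nonempty dropWhile fails the predicate
lemma pvDropWhile_head (q : Char → Bool) : ∀ (l : List Char) (s : Char) (rest : List Char),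
    l.dropWhile q = s :: rest → q s = false := by
  intro l
  induction l with
  | nil => intro s rest h; simp [List.dropWhile] at h
  | cons c cs ih =>
      intro s rest h
      by_cases hc : q c = true
      · rw [List.dropWhile_cons_of_pos hc] at h
        exact ih s rest h
      · rw [List.dropWhile_cons_of_neg hc] at h
        cases h
        simpa using hc

-- main invariant: A's fold from a group boundary equals B's positional add
lemma pvMain : ∀ (n : Nat) (l : List Char) (obj : List Int) (idx : Nat),
    l.length ≤ n → idx < obj.length →
    (l.foldl pvStepA (obj, 2, idx)).1
      = pvAddVals (obj ++ List.replicate ((pvTkr [] l).length - 1) 0) idx ((pvTkr [] l).map pvGroupVal) := by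
  intro n
  induction n with
  | zero =>
      intro l obj idx hn hidx
      have : l = [] := List.eq_nil_of_length_eq_zero (Nat.le_zero.mp hn)
      subst this
      simp [pvTkr, pvAddVals, pvGroupVal, PySem.List.enumerate_nil, List.getD, hidx]
  | succ m ih =>
      intro l obj idx hn hidx
      set q : Char → Bool := fun c => !pvIsSep c with hq
      have hsplit : l.takeWhile q ++ l.dropWhile q = l := List.takeWhile_append_dropWhile
      have hds0 : ∀ c ∈ l.takeWhile q, pvIsSep c = false := by
        intro c hc
        have := List.mem_takeWhile_imp hc
        simpa [hq] using this
      cases hrest : l.dropWhile q with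
      | nil =>
          -- no separator in l: a single digit run
          have hl : l.takeWhile q = l := by
            rw [hrest, List.append_nil] at hsplit; exact hsplit
          have hall : ∀ c ∈ l, pvIsSep c = false := by
            intro c hc; exact hds0 c (by rw [hl]; exact hc)
          rw [pvTkr_nosep l [] hall]
          rw [pvFoldDigits l 2 obj idx hall hidx]
          simp [pvAddVals, pvGroupVal_eq]
      | cons s rest =>
          have hs : pvIsSep s = true := by
            have := pvDropWhile_head q l s rest hrest
            simpa [hq] using this
          obtain ⟨ds, hds, hldec⟩ :
              ∃ ds, (∀ c ∈ ds, pvIsSep c = false) ∧ l = ds ++ s :: rest := by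
            refine ⟨l.takeWhile q, hds0, ?_⟩
            conv_lhs => rw [← hsplit, hrest]
          have hrlen : rest.length ≤ m := by
            have := congrArg List.length hldec
            simp [List.length_append] at this
            omega
          rw [hldec, List.foldl_append, pvFoldDigits ds 2 obj idx hds hidx]
          simp only [List.foldl_cons, pvStepA, hs, if_true]
          set obj' := obj.set idx (obj.getD idx 0 + pvValp 2 ds) with hobj'
          have hidx' : idx + 1 < (obj' ++ [0]).length := by
            simp [hobj', List.length_set]
            omega
          rw [ih rest (obj' ++ [0]) (idx + 1) hrlen hidx']
          rw [pvTkr_split s rest hs ds [] hds]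
          have hpos := pvTkr_length_pos rest []
          set g' := (pvTkr [] rest).length with hg'
          simp only [List.nil_append, List.length_cons, Nat.add_sub_cancel, List.map_cons]
          have hrep : List.replicate g' (0 : Int) = 0 :: List.replicate (g' - 1) 0 := by
            cases hg2 : g' with
            | zero => omega
            | succ t => simp [List.replicate_succ]
          rw [hrep]
          show pvAddVals ((obj' ++ [0]) ++ List.replicate (g' - 1) 0) (idx + 1)
              ((pvTkr [] rest).map pvGroupVal)
            = pvAddVals ((obj ++ (0 : Int) :: List.replicate (g' - 1) 0).set idx
                ((obj ++ (0 : Int) :: List.replicate (g' - 1) 0).getD idx 0 + pvGroupVal ds))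
                (idx + 1) ((pvTkr [] rest).map pvGroupVal)
          have hgetD : (obj ++ (0 : Int) :: List.replicate (g' - 1) 0).getD idx 0
              = obj.getD idx 0 := by
            simp [List.getD, List.getElem?_append_left hidx]
          have hset : (obj ++ (0 : Int) :: List.replicate (g' - 1) 0).set idx
              (obj.getD idx 0 + pvGroupVal ds)
              = (obj' ++ [0]) ++ List.replicate (g' - 1) 0 := by
            rw [List.set_append_left _ _ hidx, hobj', pvGroupVal_eq]
            simp
          rw [hgetD, hset]

-- ===== VERDICT (by name: the statement is the Claim_ definition above) =====
-- (only `object ≠ []` of Pre_ is needed by the kernel proof; the digit/run-length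
-- conditions of Pre_ are where the Python programs raise or leave the int type)
theorem translate_in_decimal_spec : Claim_equal_translate_in_decimal := by
  intro obj s _hdom hpre
  unfold Spec_translate_in_decimal translate_in_decimal translate_in_decimal_alt
  have hidx : 0 < obj.length := by
    cases obj with
    | nil => exact absurd rfl hpre.1
    | cons a l => simp
  rw [pvMain s.toList.length s.toList obj 0 le_rfl hidx]
  have htok := pvTok_eq s.toList [] []
  simp only [List.nil_append] at htok
  simp only [htok]
  have := pvEnumFold_eq ((pvTkr [] s.toList).map pvGroupVal) 0
    ((obj ++ List.replicate ((pvTkr [] s.toList).length - 1) 0))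
  simp only [Nat.cast_zero] at this
  rw [this]
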